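-- pv_equiv track=rewrite | github.com/johBac97/mirex2025-musecoco | utils_midi/remi_utils.py | in_condition_collapse_chroma
-- ===== SOURCE A (Python) =====
-- def from_pitch_token_get_pitch_id(tok_p):
--     '''
--     Get pitch id in integer from pitch token
--     '''
--     return int(tok_p.split("-")[1])
--
-- def in_condition_collapse_chroma(condition_seq, deduplicate=True):
--     '''
--     Collapse the content sequence to chroma
--
--     By compressing all non-melody pitch tokens into the first octave (pitch 0-11)
--     '''
--     # Get the position and pitch info from content
--     pitch_tok_idx = condition_seq.index('PITCH')
--     if condition_seq[pitch_tok_idx+1] == 'INS':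
--         return condition_seq
--
--     content_start_idx = pitch_tok_idx + 1
--     content_end_idx = condition_seq.index('INS')
--     content_seq = condition_seq[content_start_idx:content_end_idx]
--
--     # Organize content into a dict, key is all possible 'o-' tokens
--     content_dict = {}
--     cur_pos = None
--     for tok in content_seq:
--         if tok.startswith('o-'):
--             cur_pos = tok
--             content_dict[cur_pos] = []
--         elif tok.startswith('p-'):
--             content_dict[cur_pos].append(tok)
--
--     # Collapse the content
--     new_content_dict = {}
--     for pos in content_dict:
--         drum_notes = []
--         instrument_notes = []
--         inst_note_collapsed = []
--         new_content_dict[pos] = []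
--
--         # Save drum notes to drum_notes list
--         drum_notes = [pitch for pitch in content_dict[pos] if from_pitch_token_get_pitch_id(pitch) >= 128]
--         # Remove drum notes from content_dict
--         instrument_notes = [pitch for pitch in content_dict[pos] if from_pitch_token_get_pitch_id(pitch) < 128]
--
--         pitch_tokens = instrument_notes
--         # Preserve melody pitch and "counter melody pitch", which is the two highest pitch
--         # The rest are compressed to the first octave
--         if len(pitch_tokens) <= 2:
--             inst_note_collapsed.extend(pitch_tokens)
--         else:
--             # Get the largest two pitch tokens in the position
--             melody_pitch = max(pitch_tokens, key=lambda x: from_pitch_token_get_pitch_id(x))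
--             pitch_tokens.remove(melody_pitch)
--             counter_melody_pitch = max(pitch_tokens, key=lambda x: from_pitch_token_get_pitch_id(x))
--             pitch_tokens.remove(counter_melody_pitch)
--             inst_note_collapsed.append(melody_pitch)
--             inst_note_collapsed.append(counter_melody_pitch)
--
--             for pitch_tok in pitch_tokens:
--                 if pitch_tok != melody_pitch and pitch_tok != counter_melody_pitch:
--                     inst_note_collapsed.append(convert_pitch_token_to_first_octave(pitch_tok))
--
--             # Sort tokens by pitch id in descending order
--             inst_note_collapsed = sorted(inst_note_collapsed, key=lambda x: from_pitch_token_get_pitch_id(x), reverse=True)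
--
--         # Sort drum notes by pitch id, descending order
--         drum_notes = sorted(drum_notes, key=lambda x: from_pitch_token_get_pitch_id(x), reverse=True)
--
--         # Add drum notes to the end
--         inst_note_collapsed.extend(drum_notes)
--
--         # Deduplicate any repeated pitch tokens
--         if deduplicate is True:
--             inst_note_collapsed = list(dict.fromkeys(inst_note_collapsed))
--
--         new_content_dict[pos] = inst_note_collapsed
--
--     # Convert the dict back to a list
--     new_content_seq = []
--     for pos in new_content_dict:
--         new_content_seq.append(pos)
--         new_content_seq.extend(new_content_dict[pos])
--
--     # Reconstruct the condition_seq
--     ret = condition_seq[:content_start_idx] + new_content_seq + condition_seq[content_end_idx:]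
--
--     return ret
--
-- def convert_pitch_token_to_first_octave(pitch_tok):
--     '''
--     Map the pitch token to the first octave (id from 0 to 11)
--     '''
--     pitch_id = from_pitch_token_get_pitch_id(pitch_tok)
--     new_pitch_id = pitch_id % 12
--     new_pitch_tok = 'p-' + str(new_pitch_id)
--     return new_pitch_tok
-- ===== SOURCE B (Python) =====
-- def _collapse_group(notes, deduplicate):
--     key = lambda t: int(t.split('-')[1])
--     drums = sorted([t for t in notes if key(t) >= 128], key=key, reverse=True)
--     inst = [t for t in notes if key(t) < 128]
--     if len(inst) > 2:
--         s = sorted(inst, key=key, reverse=True)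
--         rest = ['p-' + str(key(t) % 12) for t in s[2:] if t != s[0] and t != s[1]]
--         inst = sorted([s[0], s[1]] + rest, key=key, reverse=True)
--     out = inst + drums
--     if deduplicate is True:
--         out = list(dict.fromkeys(out))
--     return out
--
--
-- def in_condition_collapse_chroma(condition_seq, deduplicate=True):
--     pitch_tok_idx = condition_seq.index('PITCH')
--     if condition_seq[pitch_tok_idx + 1] == 'INS':
--         return condition_seq
--     content_start_idx = pitch_tok_idx + 1
--     content_end_idx = condition_seq.index('INS')
--     new_content_seq = []
--     group = None
--     for tok in condition_seq[content_start_idx:content_end_idx]: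
--         if tok.startswith('o-'):
--             if group is not None:
--                 new_content_seq.append(group[0])
--                 new_content_seq.extend(_collapse_group(group[1], deduplicate))
--             group = (tok, [])
--         elif tok.startswith('p-'):
--             group[1].append(tok)  # raises TypeError on an orphan pitch token, like A's KeyError
--     if group is not None:
--         new_content_seq.append(group[0])
--         new_content_seq.extend(_collapse_group(group[1], deduplicate))
--     return condition_seq[:content_start_idx] + new_content_seq + condition_seq[content_end_idx:]
-- ===== Notes on version B (the rewrite author's own statement) =====
-- stated objective: simpler
-- what changed: B replaces A's two-dict group/rebuild machinery with one streaming pass that emits each position's block as it is completed, and replaces A's max/remove/max/remove top-2 selection with a single stable descending sort whose first two elements are the kept pitches. Pre_ excludes sequences whose content repeats an 'o-' position token, on which A's dict keying resets the earlier group and reorders output accidentally (B keeps both groups in stream order).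
import Mathlib
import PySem

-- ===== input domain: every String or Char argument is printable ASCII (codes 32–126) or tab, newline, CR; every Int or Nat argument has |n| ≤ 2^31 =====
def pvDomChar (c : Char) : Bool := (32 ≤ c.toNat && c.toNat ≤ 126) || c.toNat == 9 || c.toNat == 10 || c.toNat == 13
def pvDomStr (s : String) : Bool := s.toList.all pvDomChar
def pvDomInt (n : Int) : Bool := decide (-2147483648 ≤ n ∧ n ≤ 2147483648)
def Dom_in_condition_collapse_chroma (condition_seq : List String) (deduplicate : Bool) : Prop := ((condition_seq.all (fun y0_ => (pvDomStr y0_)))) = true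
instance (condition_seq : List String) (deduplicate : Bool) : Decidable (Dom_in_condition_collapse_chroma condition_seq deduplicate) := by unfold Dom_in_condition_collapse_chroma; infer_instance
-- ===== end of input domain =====

-- B replaces A's two-dict group-then-rebuild machinery by one streaming pass that emits each
-- position block as soon as it is complete, and replaces A's max/remove/max/remove top-2 selection
-- by a single stable descending sort whose first two elements are the kept pitches (objective: simpler).

-- shared helpers: both Pythons use from_pitch_token_get_pitch_id = int(tok.split('-')[1])
-- and build collapsed tokens as 'p-' + str(pitch_id % 12)
def pvPidOpt (tok : String) : Option Int :=
  (PySem.List.pyGet? ((PySem.Str.split? tok "-").getD []) 1).bind PySem.Int.ofStr?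

def pvPid (tok : String) : Int := (pvPidOpt tok).getD 0

def pvColl (tok : String) : String :=
  String.ofList ('p' :: '-' :: PySem.Int.toChars (PySem.Int.mod (pvPid tok) 12))

-- ===== PORT A =====

-- the body of A's per-position loop (drums / top-2 by repeated max+remove / collapse / sort / dedup)
-- (max() on an empty list is unreachable in this branch, so its port carries a "" default)
def pvCollapseA (notes : List String) (dedup : Bool) : List String :=
  let drums := notes.filter (fun p => 128 ≤ pvPid p)
  let inst0 := notes.filter (fun p => pvPid p < 128)
  let inst :=
    if inst0.length ≤ 2 then inst0
    else
      let melody := (PySem.List.max? inst0 pvPid).getD ""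
      let pt1 := (PySem.List.remove? inst0 melody).getD inst0
      let counter := (PySem.List.max? pt1 pvPid).getD ""
      let pt2 := (PySem.List.remove? pt1 counter).getD pt1
      let acc := pt2.foldl
        (fun acc t => if t ≠ melody ∧ t ≠ counter then acc ++ [pvColl t] else acc)
        [melody, counter]
      PySem.List.sorted acc pvPid true
  let out := inst ++ PySem.List.sorted drums pvPid true
  if dedup then PySem.List.dedup out else out

-- A's first loop: group pitch tokens under the current 'o-' position, in a dict
def pvStepA (st : PySem.Dict String (List String) × Option String) (tok : String) :
    PySem.Dict String (List String) × Option String :=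
  if PySem.Str.startswith tok "o-" then (st.1.insert tok [], some tok)
  else if PySem.Str.startswith tok "p-" then
    match st.2 with
    | some pos => (st.1.modify pos [] (fun l => l ++ [tok]), st.2)
    | none => st  -- Python raises KeyError here (content_dict[None]); excluded by Pre_
  else st

def in_condition_collapse_chroma (condition_seq : List String) (deduplicate : Bool) : List String :=
  let i : Nat := (PySem.List.index? condition_seq "PITCH").getD 0
  if (PySem.List.pyGet? condition_seq ((i : Int) + 1)).getD "" = "INS" then condition_seq
  else
    let start : Nat := i + 1
    let e : Nat := (PySem.List.index? condition_seq "INS").getD 0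
    let content := PySem.List.slice condition_seq (some (start : Int)) (some (e : Int))
    let st := content.foldl pvStepA (PySem.Dict.mk [], none)
    let ncd := st.1.items.foldl
      (fun (d : PySem.Dict String (List String)) pn => d.insert pn.1 (pvCollapseA pn.2 deduplicate))
      (PySem.Dict.mk [])
    let newContent := ncd.items.foldl (fun acc pn => (acc ++ [pn.1]) ++ pn.2) ([] : List String)
    PySem.List.slice condition_seq none (some (start : Int)) ++ newContent ++
      PySem.List.slice condition_seq (some (e : Int)) none

-- ===== PORT B =====

-- B's per-position collapse: one stable descending sort; s[0], s[1] are the kept pitches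
def pvCollapseB (notes : List String) (dedup : Bool) : List String :=
  let drums := PySem.List.sorted (notes.filter (fun t => 128 ≤ pvPid t)) pvPid true
  let inst0 := notes.filter (fun t => pvPid t < 128)
  let inst :=
    if 2 < inst0.length then
      let s := PySem.List.sorted inst0 pvPid true
      let a := (PySem.List.pyGet? s 0).getD ""
      let b := (PySem.List.pyGet? s 1).getD ""
      let rest := ((PySem.List.slice s (some 2) none).filter (fun x => x ≠ a ∧ x ≠ b)).map pvColl
      PySem.List.sorted ([a, b] ++ rest) pvPid true
    else inst0
  let out := inst ++ drums
  if dedup then PySem.List.dedup out else out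

-- B's streaming pass: flush the finished group whenever a new 'o-' token starts the next one
def pvStepB (dedup : Bool) (st : List String × Option (String × List String)) (tok : String) :
    List String × Option (String × List String) :=
  if PySem.Str.startswith tok "o-" then
    ((match st.2 with
      | some g => st.1 ++ g.1 :: pvCollapseB g.2 dedup
      | none => st.1), some (tok, []))
  else if PySem.Str.startswith tok "p-" then
    match st.2 with
    | some g => (st.1, some (g.1, g.2 ++ [tok]))
    | none => st  -- Python raises TypeError here (group is None); excluded by Pre_
  else st

def in_condition_collapse_chroma_alt (condition_seq : List String) (deduplicate : Bool) : List String :=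
  let i : Nat := (PySem.List.index? condition_seq "PITCH").getD 0
  if (PySem.List.pyGet? condition_seq ((i : Int) + 1)).getD "" = "INS" then condition_seq
  else
    let start : Nat := i + 1
    let e : Nat := (PySem.List.index? condition_seq "INS").getD 0
    let st := (PySem.List.slice condition_seq (some (start : Int)) (some (e : Int))).foldl
      (pvStepB deduplicate) ([], none)
    let newContent := st.1 ++
      (match st.2 with | some g => g.1 :: pvCollapseB g.2 deduplicate | none => [])
    PySem.List.slice condition_seq none (some (start : Int)) ++ newContent ++
      PySem.List.slice condition_seq (some (e : Int)) none

-- ===== PRECONDITION & SPEC =====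

-- the content slice between 'PITCH' and 'INS' that both programs parse
def pvContentOf (seq : List String) : List String :=
  PySem.List.slice seq (some (((PySem.List.index? seq "PITCH").getD 0 + 1 : Nat) : Int))
    (some (((PySem.List.index? seq "INS").getD 0 : Nat) : Int))

-- Pre_ excludes (a) the inputs where both programs raise: 'PITCH' missing or last
-- (ValueError/IndexError), 'INS' missing (ValueError), a 'p-' token whose id does not parse as an
-- int (ValueError/IndexError), a 'p-' token before the first 'o-' token (KeyError in A, TypeError
-- in B); and (b) content repeating an 'o-' position token, on which A's dict keying resets the
-- earlier group and reorders output accidentally (B keeps both groups in stream order).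
def Pre_in_condition_collapse_chroma (condition_seq : List String) (deduplicate : Bool) : Prop :=
  "PITCH" ∈ condition_seq ∧
  (PySem.List.index? condition_seq "PITCH").getD 0 + 1 < condition_seq.length ∧
  ((PySem.List.pyGet? condition_seq (((PySem.List.index? condition_seq "PITCH").getD 0 : Int) + 1)).getD "" = "INS" ∨
    ("INS" ∈ condition_seq ∧
      (∀ t ∈ pvContentOf condition_seq,
        PySem.Str.startswith t "p-" = true → (pvPidOpt t).isSome = true) ∧
      ((pvContentOf condition_seq).filter (fun t => PySem.Str.startswith t "o-")).Nodup ∧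
      (∀ t ∈ (pvContentOf condition_seq).takeWhile (fun t => !PySem.Str.startswith t "o-"),
        PySem.Str.startswith t "p-" = false)))

instance (condition_seq : List String) (deduplicate : Bool) :
    Decidable (Pre_in_condition_collapse_chroma condition_seq deduplicate) := by
  unfold Pre_in_condition_collapse_chroma; infer_instance

def pvWitness_in_condition_collapse_chroma : List String × Bool := (["PITCH", "o-0", "p-1", "INS"], true)

def Spec_in_condition_collapse_chroma (condition_seq : List String) (deduplicate : Bool) (out : List String) : Prop := out = in_condition_collapse_chroma_alt condition_seq deduplicate
instance (condition_seq : List String) (deduplicate : Bool) (out : List String) : Decidable (Spec_in_condition_collapse_chroma condition_seq deduplicate out) := by unfold Spec_in_condition_collapse_chroma; infer_instance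

-- ===== CLAIM (what is proved, stated in full; the proofs are below) =====
def Claim_equal_in_condition_collapse_chroma : Prop := ∀ (condition_seq : List String) (deduplicate : Bool), Dom_in_condition_collapse_chroma condition_seq deduplicate → Pre_in_condition_collapse_chroma condition_seq deduplicate → Spec_in_condition_collapse_chroma condition_seq deduplicate (in_condition_collapse_chroma condition_seq deduplicate)

-- ===== LEMMAS AND PROOFS =====

theorem pvWitness_ok :
    Dom_in_condition_collapse_chroma pvWitness_in_condition_collapse_chroma.1 pvWitness_in_condition_collapse_chroma.2 ∧
    Pre_in_condition_collapse_chroma pvWitness_in_condition_collapse_chroma.1 pvWitness_in_condition_collapse_chroma.2 := by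
  decide

-- step equations for PySem's stable insertion sort
theorem pv_insertBy_nil {α : Type} (bf : α → α → Bool) (x : α) :
    PySem.List.insertBy bf x [] = [x] := by simp [PySem.List.insertBy]

theorem pv_insertBy_cons {α : Type} (bf : α → α → Bool) (x y : α) (ys : List α) :
    PySem.List.insertBy bf x (y :: ys) =
      if bf x y then x :: y :: ys else y :: PySem.List.insertBy bf x ys := by
  simp [PySem.List.insertBy]

-- inserting two elements with distinct keys commutes
theorem pv_insertBy_comm (key : String → Int) (x y : String) (h : key x ≠ key y) :
    ∀ S : List String,
      PySem.List.insertBy (fun a b => decide (key b < key a)) x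
          (PySem.List.insertBy (fun a b => decide (key b < key a)) y S) =
        PySem.List.insertBy (fun a b => decide (key b < key a)) y
          (PySem.List.insertBy (fun a b => decide (key b < key a)) x S) := by
  intro S
  induction S with
  | nil =>
    simp only [pv_insertBy_nil, pv_insertBy_cons, decide_eq_true_eq]
    rcases lt_trichotomy (key x) (key y) with h1 | h1 | h1
    · rw [if_neg (by omega), if_pos h1]
    · exact absurd h1 h
    · rw [if_pos h1, if_neg (by omega)]
  | cons s t ih =>
    by_cases hxs : key s < key x <;> by_cases hys : key s < key y
    · simp only [pv_insertBy_cons, decide_eq_true_eq]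
      rw [if_pos hys, if_pos hxs]
      simp only [pv_insertBy_cons, decide_eq_true_eq]
      rcases lt_trichotomy (key x) (key y) with h1 | h1 | h1
      · rw [if_neg (show ¬ key y < key x by omega), if_pos h1, if_pos hxs]
      · exact absurd h1 h
      · rw [if_pos h1, if_neg (show ¬ key x < key y by omega), if_pos hys]
    · simp only [pv_insertBy_cons, decide_eq_true_eq]
      rw [if_neg hys, if_pos hxs]
      simp only [pv_insertBy_cons, decide_eq_true_eq]
      rw [if_pos hxs, if_neg (show ¬ key x < key y by omega), if_neg hys]
    · simp only [pv_insertBy_cons, decide_eq_true_eq]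
      rw [if_pos hys, if_neg hxs]
      simp only [pv_insertBy_cons, decide_eq_true_eq]
      rw [if_neg (show ¬ key y < key x by omega), if_neg hxs, if_pos hys]
    · simp only [pv_insertBy_cons, decide_eq_true_eq]
      rw [if_neg hys, if_neg hxs]
      simp only [pv_insertBy_cons, decide_eq_true_eq]
      rw [if_neg hxs, if_neg hys, ih]

-- sortedRev of (xs ++ [z]) is one insertion into sortedRev xs
theorem pv_sortedRev_append (key : String → Int) (xs : List String) (z : String) :
    PySem.List.sorted (xs ++ [z]) key true =
      PySem.List.insertBy (fun a b => decide (key b < key a)) z (PySem.List.sorted xs key true) := by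
  rw [PySem.List.sorted_rev_eq_foldl_insertBy, PySem.List.sorted_rev_eq_foldl_insertBy,
    List.foldl_append]
  rfl

theorem pv_max?_append_some (key : String → Int) (xs : List String) (z m' : String)
    (h : PySem.List.max? xs key = some m') :
    PySem.List.max? (xs ++ [z]) key = some (if key m' < key z then z else m') := by
  unfold PySem.List.max? at h ⊢
  rw [List.foldl_append, h]
  simp only [List.foldl_cons, List.foldl_nil]
  split <;> rfl

theorem pv_insertBy_eq_cons_of_max (key : String → Int) (z : String) (S : List String)
    (h : ∀ y ∈ S, key y < key z) :
    PySem.List.insertBy (fun a b => decide (key b < key a)) z S = z :: S := by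
  cases S with
  | nil => exact pv_insertBy_nil _ _
  | cons y ys =>
    rw [pv_insertBy_cons]
    simp [h y List.mem_cons_self]

-- selection property of Python's stable descending sort:
-- its head is max(xs, key) (the FIRST maximum) and its tail sorts the rest
theorem pv_select (key : String → Int) (xs : List String) (m : String)
    (h : PySem.List.max? xs key = some m) :
    PySem.List.sorted xs key true = m :: PySem.List.sorted (xs.erase m) key true := by
  induction xs using List.reverseRecOn with
  | nil => simp [PySem.List.max?] at h
  | append_singleton xs z ih =>
    rcases eq_or_ne xs [] with rfl | hne
    · simp only [List.nil_append] at h ⊢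
      have hmax : PySem.List.max? [z] key = some z := by simp [PySem.List.max?]
      rw [hmax] at h
      have hzm : z = m := Option.some.inj h
      subst hzm
      rw [List.erase_cons_head]
      show PySem.List.sorted ([] ++ [z]) key true = z :: PySem.List.sorted [] key true
      rw [pv_sortedRev_append]
      rfl
    · obtain ⟨m', hm'⟩ : ∃ m', PySem.List.max? xs key = some m' := by
        cases h' : PySem.List.max? xs key with
        | none => exact absurd ((PySem.List.max?_eq_none_iff xs key).mp h') hne
        | some m' => exact ⟨m', rfl⟩
      rw [pv_max?_append_some key xs z m' hm'] at h
      by_cases hlt : key m' < key z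
      · rw [if_pos hlt] at h
        have hz : m = z := (Option.some.inj h).symm
        subst hz
        have hnotin : m ∉ xs := fun hmem =>
          absurd (PySem.List.max?_isMax hm' m hmem) (not_le.mpr hlt)
        rw [List.erase_append_right _ hnotin, List.erase_cons_head, List.append_nil]
        rw [pv_sortedRev_append]
        exact pv_insertBy_eq_cons_of_max key m _ (fun y hy => by
          rw [PySem.List.mem_sorted] at hy
          exact lt_of_le_of_lt (PySem.List.max?_isMax hm' y hy) hlt)
      · rw [if_neg hlt] at h
        have hm : m = m' := (Option.some.inj h).symm
        subst hm
        have hmem : m ∈ xs := PySem.List.max?_mem hm'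
        rw [List.erase_append_left _ hmem]
        rw [pv_sortedRev_append, pv_sortedRev_append, ih hm']
        rw [pv_insertBy_cons]
        simp [hlt]

-- the collapsed token 'p-' + str(k) parses back to k for 0 ≤ k < 12
theorem pv_pid_canonical (k : Int) (h0 : 0 ≤ k) (h1 : k < 12) :
    pvPid (String.ofList ('p' :: '-' :: PySem.Int.toChars k)) = k := by
  interval_cases k <;> decide

theorem pv_pid_pvColl (t : String) : pvPid (pvColl t) = PySem.Int.mod (pvPid t) 12 :=
  pv_pid_canonical _ (PySem.Int.mod_nonneg _ (by norm_num)) (PySem.Int.mod_lt _ (by norm_num))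

theorem pv_pvColl_eq_of_pid_eq (a b : String) (h : pvPid (pvColl a) = pvPid (pvColl b)) :
    pvColl a = pvColl b := by
  rw [pv_pid_pvColl, pv_pid_pvColl] at h
  unfold pvColl
  rw [h]

-- folding insertions of a list whose equal-key elements are equal depends only on its multiset
theorem pv_foldl_ins_perm {X Y : List String} (hp : X.Perm Y)
    (hc : ∀ a ∈ X, ∀ b ∈ X, pvPid a = pvPid b → a = b) (S : List String) :
    X.foldl (fun acc x => PySem.List.insertBy (fun a b => decide (pvPid b < pvPid a)) x acc) S =
      Y.foldl (fun acc x => PySem.List.insertBy (fun a b => decide (pvPid b < pvPid a)) x acc) S := by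
  refine hp.foldl_eq' (fun x hx y hy z => ?_) S
  by_cases hxy : x = y
  · subst hxy; rfl
  · exact (pv_insertBy_comm pvPid x y (fun he => hxy (hc x hx y hy he)) z).symm

-- A's per-position result equals B's per-position result
theorem pv_collapse_eq (notes : List String) (dedup : Bool) :
    pvCollapseA notes dedup = pvCollapseB notes dedup := by
  simp only [pvCollapseA, pvCollapseB]
  set L := notes.filter (fun t => decide (pvPid t < 128)) with hL
  by_cases hlen : L.length ≤ 2
  · rw [if_pos hlen, if_neg (show ¬ 2 < L.length by omega)]
  · rw [if_neg hlen, if_pos (show 2 < L.length by omega)]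
    obtain ⟨m, hm⟩ : ∃ m, PySem.List.max? L pvPid = some m := by
      cases h' : PySem.List.max? L pvPid with
      | none =>
        rw [PySem.List.max?_eq_none_iff] at h'
        rw [h'] at hlen; simp at hlen
      | some m => exact ⟨m, rfl⟩
    have hlen1 : (L.erase m).length = L.length - 1 :=
      List.length_erase_of_mem (PySem.List.max?_mem hm)
    obtain ⟨c, hc⟩ : ∃ c, PySem.List.max? (L.erase m) pvPid = some c := by
      cases h' : PySem.List.max? (L.erase m) pvPid with
      | none =>
        rw [PySem.List.max?_eq_none_iff] at h'
        have := congrArg List.length h'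
        rw [hlen1] at this; simp at this; omega
      | some c => exact ⟨c, rfl⟩
    have hrem1 := PySem.List.remove?_eq_some_erase L m (PySem.List.max?_mem hm)
    have hrem2 := PySem.List.remove?_eq_some_erase (L.erase m) c (PySem.List.max?_mem hc)
    simp only [hm, Option.getD_some, hrem1, hc, hrem2]
    have hs : PySem.List.sorted L pvPid true =
        m :: c :: PySem.List.sorted ((L.erase m).erase c) pvPid true := by
      rw [pv_select pvPid L m hm, pv_select pvPid (L.erase m) c hc]
    simp only [hs]
    have hget0 : (PySem.List.pyGet?
        (m :: c :: PySem.List.sorted ((L.erase m).erase c) pvPid true) 0).getD "" = m := by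
      simp [PySem.List.pyGet?_zero]
    have hget1 : (PySem.List.pyGet?
        (m :: c :: PySem.List.sorted ((L.erase m).erase c) pvPid true) 1).getD "" = c := by
      rw [show (1 : Int) = ((1 : Nat) : Int) by norm_num, PySem.List.pyGet?_natCast]
      rfl
    have hslice : PySem.List.slice
        (m :: c :: PySem.List.sorted ((L.erase m).erase c) pvPid true) (some 2) none =
        PySem.List.sorted ((L.erase m).erase c) pvPid true := by
      rw [show (2 : Int) = ((2 : Nat) : Int) by norm_num, PySem.List.slice_from_natCast]
      rfl
    simp only [hget0, hget1, hslice]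
    rw [PySem.List.foldl_append_ite (fun t => t ≠ m ∧ t ≠ c) pvColl]
    have hfin : PySem.List.sorted
        ([m, c] ++ (((L.erase m).erase c).filter (fun x => decide (x ≠ m ∧ x ≠ c))).map pvColl)
        pvPid true =
        PySem.List.sorted
        ([m, c] ++ ((PySem.List.sorted ((L.erase m).erase c) pvPid true).filter
          (fun x => decide (x ≠ m ∧ x ≠ c))).map pvColl) pvPid true := by
      rw [PySem.List.sorted_rev_eq_foldl_insertBy, PySem.List.sorted_rev_eq_foldl_insertBy,
        List.foldl_append, List.foldl_append]
      exact pv_foldl_ins_perm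
        ((((PySem.List.sorted_perm ((L.erase m).erase c) pvPid true).filter _).map pvColl).symm)
        (fun a ha b hb hpid => by
          obtain ⟨u, _, rfl⟩ := List.mem_map.mp ha
          obtain ⟨v, _, rfl⟩ := List.mem_map.mp hb
          exact pv_pvColl_eq_of_pid_eq u v hpid) _
    rw [hfin]

-- dict plumbing on explicit item lists
theorem pv_get?_append_last (l1 : List (String × List String)) (k : String) (v : List String)
    (h : k ∉ l1.map Prod.fst) :
    (PySem.Dict.mk (l1 ++ [(k, v)])).get? k = some v := by
  induction l1 with
  | nil => simp [PySem.Dict.get?_mk_cons]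
  | cons p l ih =>
    have h1 : ¬ p.1 = k := fun he => h (by simp [he])
    have h2 : k ∉ l.map Prod.fst := fun hm => h (by simp [hm])
    rw [List.cons_append, PySem.Dict.get?_mk_cons, if_neg (by simpa using h1)]
    exact ih h2

theorem pv_contains_eq_false (l : List (String × List String)) (k : String)
    (h : k ∉ l.map Prod.fst) : (PySem.Dict.mk l).contains k = false := by
  simp only [PySem.Dict.contains, List.any_eq_false]
  intro p hp hbeq
  exact h (List.mem_map.mpr ⟨p, hp, by simpa using hbeq⟩)

theorem pv_insert_fresh (l : List (String × List String)) (k : String) (v : List String)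
    (h : k ∉ l.map Prod.fst) :
    (PySem.Dict.mk l).insert k v = PySem.Dict.mk (l ++ [(k, v)]) := by
  unfold PySem.Dict.insert
  rw [pv_contains_eq_false l k h]
  simp

theorem pv_insert_last (l1 : List (String × List String)) (k : String) (old v : List String)
    (h : k ∉ l1.map Prod.fst) :
    (PySem.Dict.mk (l1 ++ [(k, old)])).insert k v = PySem.Dict.mk (l1 ++ [(k, v)]) := by
  unfold PySem.Dict.insert
  have hcont : (PySem.Dict.mk (l1 ++ [(k, old)])).contains k = true := by
    simp [PySem.Dict.contains]
  rw [if_pos hcont]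
  congr 1
  simp only [List.map_append]
  congr 1
  · refine (List.map_congr_left fun p hp => ?_).trans (List.map_id _)
    have : p.1 ≠ k := fun he => h (List.mem_map.mpr ⟨p, hp, he⟩)
    simp [this]
  · simp

theorem pv_modify_last (l1 : List (String × List String)) (k : String) (notes : List String)
    (tok : String) (h : k ∉ l1.map Prod.fst) :
    (PySem.Dict.mk (l1 ++ [(k, notes)])).modify k [] (fun l => l ++ [tok]) =
      PySem.Dict.mk (l1 ++ [(k, notes ++ [tok])]) := by
  unfold PySem.Dict.modify PySem.Dict.getD
  rw [pv_get?_append_last l1 k notes h]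
  simp only [Option.getD_some]
  exact pv_insert_last l1 k notes (notes ++ [tok]) h

-- small step lemmas for the two loop bodies
theorem pvStepA_o (st : PySem.Dict String (List String) × Option String) (tok : String)
    (ho : PySem.Str.startswith tok "o-" = true) :
    pvStepA st tok = (st.1.insert tok [], some tok) := by
  unfold pvStepA; rw [if_pos ho]

theorem pvStepA_p (d : PySem.Dict String (List String)) (cur tok : String)
    (ho : ¬ PySem.Str.startswith tok "o-" = true) (hp : PySem.Str.startswith tok "p-" = true) :
    pvStepA (d, some cur) tok = (d.modify cur [] (fun l => l ++ [tok]), some cur) := by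
  unfold pvStepA; rw [if_neg ho, if_pos hp]

theorem pvStepA_p_none (d : PySem.Dict String (List String)) (tok : String)
    (ho : ¬ PySem.Str.startswith tok "o-" = true) (hp : PySem.Str.startswith tok "p-" = true) :
    pvStepA (d, none) tok = (d, none) := by
  unfold pvStepA; rw [if_neg ho, if_pos hp]

theorem pvStepA_skip (st : PySem.Dict String (List String) × Option String) (tok : String)
    (ho : ¬ PySem.Str.startswith tok "o-" = true) (hp : ¬ PySem.Str.startswith tok "p-" = true) :
    pvStepA st tok = st := by
  unfold pvStepA; rw [if_neg ho, if_neg hp]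

theorem pvStepB_o_some (dedup : Bool) (acc : List String) (g : String × List String) (tok : String)
    (ho : PySem.Str.startswith tok "o-" = true) :
    pvStepB dedup (acc, some g) tok = (acc ++ g.1 :: pvCollapseB g.2 dedup, some (tok, [])) := by
  unfold pvStepB; rw [if_pos ho]

theorem pvStepB_o_none (dedup : Bool) (acc : List String) (tok : String)
    (ho : PySem.Str.startswith tok "o-" = true) :
    pvStepB dedup (acc, none) tok = (acc, some (tok, [])) := by
  unfold pvStepB; rw [if_pos ho]

theorem pvStepB_p (dedup : Bool) (acc : List String) (g : String × List String) (tok : String)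
    (ho : ¬ PySem.Str.startswith tok "o-" = true) (hp : PySem.Str.startswith tok "p-" = true) :
    pvStepB dedup (acc, some g) tok = (acc, some (g.1, g.2 ++ [tok])) := by
  unfold pvStepB; rw [if_neg ho, if_pos hp]

theorem pvStepB_p_none (dedup : Bool) (acc : List String) (tok : String)
    (ho : ¬ PySem.Str.startswith tok "o-" = true) (hp : PySem.Str.startswith tok "p-" = true) :
    pvStepB dedup (acc, none) tok = (acc, none) := by
  unfold pvStepB; rw [if_neg ho, if_pos hp]

theorem pvStepB_skip (dedup : Bool) (st : List String × Option (String × List String)) (tok : String)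
    (ho : ¬ PySem.Str.startswith tok "o-" = true) (hp : ¬ PySem.Str.startswith tok "p-" = true) :
    pvStepB dedup st tok = st := by
  unfold pvStepB; rw [if_neg ho, if_neg hp]

theorem pv_filter_o_pos (tok : String) (rest : List String)
    (h : PySem.Str.startswith tok "o-" = true) :
    (tok :: rest).filter (fun t => PySem.Str.startswith t "o-") =
      tok :: rest.filter (fun t => PySem.Str.startswith t "o-") := by
  rw [List.filter_cons, if_pos h]

theorem pv_filter_o_neg (tok : String) (rest : List String)
    (h : ¬ PySem.Str.startswith tok "o-" = true) :
    (tok :: rest).filter (fun t => PySem.Str.startswith t "o-") =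
      rest.filter (fun t => PySem.Str.startswith t "o-") := by
  rw [List.filter_cons, if_neg h]

-- A's rebuild of the dict and final flattening loop, as one flatMap (using B's collapse)
def pvE (l : List (String × List String)) (dedup : Bool) : List String :=
  l.flatMap (fun pn => pn.1 :: pvCollapseB pn.2 dedup)

def pvPostA (st : PySem.Dict String (List String) × Option String) (dedup : Bool) : List String :=
  ((st.1.items.foldl
      (fun (d : PySem.Dict String (List String)) pn => d.insert pn.1 (pvCollapseA pn.2 dedup))
      (PySem.Dict.mk [])).items).foldl (fun acc pn => (acc ++ [pn.1]) ++ pn.2) ([] : List String)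

def pvPostB (st : List String × Option (String × List String)) (dedup : Bool) : List String :=
  st.1 ++ (match st.2 with | some g => g.1 :: pvCollapseB g.2 dedup | none => [])

theorem pv_build_items (dedup : Bool) (items : List (String × List String))
    (h : (items.map Prod.fst).Nodup) :
    ((items.foldl
        (fun (d : PySem.Dict String (List String)) pn => d.insert pn.1 (pvCollapseA pn.2 dedup))
        (PySem.Dict.mk [])).items) = items.map (fun pn => (pn.1, pvCollapseA pn.2 dedup)) := by
  induction items using List.reverseRecOn with
  | nil => rfl
  | append_singleton items pn ih =>
    rw [List.map_append] at h
    have hnd : (items.map Prod.fst).Nodup := (List.nodup_append.mp h).1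
    have hni : pn.1 ∉ items.map Prod.fst := fun hmem =>
      (List.nodup_append.mp h).2.2 pn.1 hmem pn.1 (by simp) rfl
    have hD : (items.foldl
        (fun (d : PySem.Dict String (List String)) pn => d.insert pn.1 (pvCollapseA pn.2 dedup))
        (PySem.Dict.mk [])) =
        PySem.Dict.mk (items.map (fun pn => (pn.1, pvCollapseA pn.2 dedup))) :=
      PySem.Dict.ext (ih hnd)
    rw [List.foldl_append, List.foldl_cons, List.foldl_nil, hD,
      pv_insert_fresh _ _ _ (by simpa using hni)]
    simp

theorem pv_postA_eq_E (st : PySem.Dict String (List String) × Option String) (dedup : Bool)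
    (h : (st.1.items.map Prod.fst).Nodup) : pvPostA st dedup = pvE st.1.items dedup := by
  unfold pvPostA pvE
  rw [pv_build_items dedup _ h, List.foldl_map]
  simp only [List.append_assoc, List.singleton_append]
  rw [PySem.List.foldl_append_eq_flatMap]
  simp [pv_collapse_eq]

-- the freshness facts the loop equivalence consumes: nodup 'o-' tokens, none already a key
def pvFresh (content ks : List String) : Prop :=
  ((content.filter (fun t => PySem.Str.startswith t "o-")).Nodup) ∧
  ∀ t ∈ content, PySem.Str.startswith t "o-" = true → t ∉ ks

theorem pvE_append (l : List (String × List String)) (p : String × List String) (dedup : Bool) :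
    pvE (l ++ [p]) dedup = pvE l dedup ++ p.1 :: pvCollapseB p.2 dedup := by
  simp [pvE]

-- the running equivalence of A's dict loop and B's streaming loop
theorem pv_main_loop (content : List String) :
    ∀ (dedup : Bool) (prev : List (String × List String)) (cur : String) (notes : List String),
      pvFresh content (prev.map Prod.fst ++ [cur]) →
      (prev.map Prod.fst ++ [cur]).Nodup →
      pvPostA (content.foldl pvStepA (PySem.Dict.mk (prev ++ [(cur, notes)]), some cur)) dedup =
        pvPostB (content.foldl (pvStepB dedup) (pvE prev dedup, some (cur, notes))) dedup := by
  induction content with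
  | nil =>
    intro dedup prev cur notes _ hnd
    simp only [List.foldl_nil]
    rw [pv_postA_eq_E _ _ (by simpa using hnd)]
    simp [pvE, pvPostB]
  | cons tok rest ih =>
    intro dedup prev cur notes hf hnd
    by_cases ho : PySem.Str.startswith tok "o-" = true
    · have htokfresh : tok ∉ prev.map Prod.fst ++ [cur] := hf.2 tok List.mem_cons_self ho
      have hfilter : (tok :: rest).filter (fun t => PySem.Str.startswith t "o-") =
          tok :: rest.filter (fun t => PySem.Str.startswith t "o-") := pv_filter_o_pos tok rest ho
      simp only [List.foldl_cons]
      rw [pvStepA_o _ _ ho]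
      rw [pv_insert_fresh _ _ _ (by simpa using htokfresh)]
      rw [pvStepB_o_some dedup _ _ _ ho]
      rw [show pvE prev dedup ++ cur :: pvCollapseB notes dedup = pvE (prev ++ [(cur, notes)]) dedup
        from (pvE_append prev (cur, notes) dedup).symm]
      apply ih dedup (prev ++ [(cur, notes)]) tok []
      · constructor
        · have h1 := hf.1
          rw [hfilter] at h1
          exact h1.of_cons
        · intro t ht hto
          have hne : t ≠ tok := by
            have hnodup := hf.1
            rw [hfilter] at hnodup
            have htok : tok ∉ rest.filter (fun t => PySem.Str.startswith t "o-") :=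
              (List.nodup_cons.mp hnodup).1
            intro he; subst he
            exact htok (List.mem_filter.mpr ⟨ht, hto⟩)
          have hnotks : t ∉ prev.map Prod.fst ++ [cur] := hf.2 t (List.mem_cons_of_mem _ ht) hto
          simp only [List.map_append, List.map_cons, List.map_nil]
          simp only [List.mem_append, List.mem_cons, List.not_mem_nil] at hnotks ⊢
          tauto
      · have hmapeq : ((prev ++ [(cur, notes)]).map Prod.fst) ++ [tok] =
            (prev.map Prod.fst ++ [cur]) ++ [tok] := by simp
        rw [hmapeq, List.nodup_append]
        refine ⟨hnd, List.nodup_singleton _, fun a ha b hb => ?_⟩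
        simp only [List.mem_cons, List.not_mem_nil, or_false] at hb
        subst hb
        exact fun he => htokfresh (he ▸ ha)
    · by_cases hp : PySem.Str.startswith tok "p-" = true
      · have hcur : cur ∉ prev.map Prod.fst := fun hmem =>
          (List.nodup_append.mp hnd).2.2 cur hmem cur (by simp) rfl
        simp only [List.foldl_cons]
        rw [pvStepA_p _ _ _ ho hp]
        rw [pv_modify_last _ _ _ _ hcur]
        rw [pvStepB_p dedup _ _ _ ho hp]
        apply ih dedup prev cur (notes ++ [tok]) ?_ hnd
        constructor
        · have h1 := hf.1
          rwa [pv_filter_o_neg tok rest ho] at h1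
        · exact fun t ht hto => hf.2 t (List.mem_cons_of_mem _ ht) hto
      · simp only [List.foldl_cons]
        rw [pvStepA_skip _ _ ho hp, pvStepB_skip dedup _ _ ho hp]
        apply ih dedup prev cur notes ?_ hnd
        constructor
        · have h1 := hf.1
          rwa [pv_filter_o_neg tok rest ho] at h1
        · exact fun t ht hto => hf.2 t (List.mem_cons_of_mem _ ht) hto

theorem pv_entry (content : List String) :
    ∀ (dedup : Bool), pvFresh content [] →
      pvPostA (content.foldl pvStepA (PySem.Dict.mk [], none)) dedup =
        pvPostB (content.foldl (pvStepB dedup) ([], none)) dedup := by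
  induction content with
  | nil => intro dedup _; rfl
  | cons tok rest ih =>
    intro dedup hf
    by_cases ho : PySem.Str.startswith tok "o-" = true
    · simp only [List.foldl_cons]
      rw [pvStepA_o _ _ ho]
      rw [pv_insert_fresh _ _ _ (by simp)]
      rw [pvStepB_o_none dedup _ _ ho]
      have := pv_main_loop rest dedup [] tok []
      simp only [List.map_nil, List.nil_append, pvE, List.flatMap_nil] at this
      apply this
      · constructor
        · have h1 := hf.1
          rw [pv_filter_o_pos tok rest ho] at h1
          exact h1.of_cons
        · intro t ht hto
          have hnodup := hf.1
          rw [pv_filter_o_pos tok rest ho] at hnodup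
          have htok : tok ∉ rest.filter (fun t => PySem.Str.startswith t "o-") :=
            (List.nodup_cons.mp hnodup).1
          simp only [List.mem_cons, List.not_mem_nil, or_false]
          intro he; subst he
          exact htok (List.mem_filter.mpr ⟨ht, hto⟩)
      · simp
    · by_cases hp : PySem.Str.startswith tok "p-" = true
      · simp only [List.foldl_cons]
        rw [pvStepA_p_none _ _ ho hp, pvStepB_p_none dedup _ _ ho hp]
        apply ih dedup
        constructor
        · have h1 := hf.1
          rwa [pv_filter_o_neg tok rest ho] at h1
        · simp
      · simp only [List.foldl_cons]
        rw [pvStepA_skip _ _ ho hp, pvStepB_skip dedup _ _ ho hp]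
        apply ih dedup
        constructor
        · have h1 := hf.1
          rwa [pv_filter_o_neg tok rest ho] at h1
        · simp

-- ===== VERDICT (by name: the statement is the Claim_ definition above) =====
theorem in_condition_collapse_chroma_spec : Claim_equal_in_condition_collapse_chroma := by
  intro seq dedup _ hpre
  unfold Spec_in_condition_collapse_chroma
  simp only [in_condition_collapse_chroma, in_condition_collapse_chroma_alt]
  by_cases hc : (PySem.List.pyGet? seq (((PySem.List.index? seq "PITCH").getD 0 : Int) + 1)).getD "" = "INS"
  · rw [if_pos hc, if_pos hc]
  · rw [if_neg hc, if_neg hc]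
    have hfresh : pvFresh (pvContentOf seq) [] := by
      rcases hpre with ⟨_, _, hd⟩
      rcases hd with hd | ⟨_, _, hnodup, _⟩
      · exact absurd hd hc
      · exact ⟨hnodup, by simp⟩
    congr 2
    exact pv_entry (pvContentOf seq) dedup hfresh
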